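-- pv_equiv track=rewrite | github.com/Parallel-in-Time/pySDC | docs/convert_markdown.py | setImgPath
-- ===== SOURCE A (Python) =====
-- def setImgPath(rst):
--     i = 0
--     while i != -1:
--         i = rst.find('<img src=".', i)
--         if i != -1:
--             rst = rst[:i+11]+'/_images'+rst[i+11:]
--             i += 16
--     return rst
-- ===== SOURCE B (Python) =====
-- def setImgPath(rst):
--     return rst.replace('<img src=".', '<img src="./_images')
-- ===== Notes on version B (the rewrite author's own statement) =====
-- stated objective: simpler
-- what changed: The manual find/slice/reinsert while-loop is replaced by a single str.replace call that rewrites each '<img src=".' occurrence to '<img src="./_images' in one left-to-right scan.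
import Mathlib
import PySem

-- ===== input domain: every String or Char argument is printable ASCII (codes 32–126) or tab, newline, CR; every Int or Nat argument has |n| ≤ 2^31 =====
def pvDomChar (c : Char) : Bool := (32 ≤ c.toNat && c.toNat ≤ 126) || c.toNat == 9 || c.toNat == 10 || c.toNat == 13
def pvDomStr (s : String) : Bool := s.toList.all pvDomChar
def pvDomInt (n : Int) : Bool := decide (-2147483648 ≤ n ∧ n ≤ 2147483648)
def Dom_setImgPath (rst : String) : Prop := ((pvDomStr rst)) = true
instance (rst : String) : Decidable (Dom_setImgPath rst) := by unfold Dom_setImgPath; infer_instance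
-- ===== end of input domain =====

-- B replaces A's manual find/slice/reinsert while-loop by a single str.replace call (simpler, one scan).

-- ===== PORT A =====
-- A's while-loop: i = rst.find('<img src=".', i); splice in '/_images'; i += 16; repeat until find fails.
-- The Nat fuel only makes the recursion total; rst.length + 1 iterations always suffice
-- (each pass consumes at least 8 remaining characters past i, proved below).
def setImgPathGo : Nat → String → Int → String
  | 0, rst, _ => rst
  | fuel + 1, rst, i =>
    let j := PySem.Str.findFrom rst "<img src=\"." i
    if j = -1 then rst
    else setImgPathGo fuel
      (PySem.Str.slice rst none (some (j + 11)) ++ "/_images" ++ PySem.Str.slice rst (some (j + 11)) none)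
      (j + 16)

def setImgPath (rst : String) : String := setImgPathGo (rst.length + 1) rst 0

-- ===== PORT B =====
def setImgPath_alt (rst : String) : String :=
  PySem.Str.replace rst "<img src=\"." "<img src=\"./_images"

-- ===== PRECONDITION & SPEC =====
def Spec_setImgPath (rst : String) (out : String) : Prop := out = setImgPath_alt rst
instance (rst : String) (out : String) : Decidable (Spec_setImgPath rst out) := by unfold Spec_setImgPath; infer_instance

-- ===== CLAIM (what is proved, stated in full; the proofs are below) =====
def Claim_equal_setImgPath : Prop := ∀ (rst : String), Dom_setImgPath rst → Spec_setImgPath rst (setImgPath rst)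

-- ===== LEMMAS AND PROOFS =====

-- the search pattern and the inserted text, as char lists
def pvPat : List Char := ['<', 'i', 'm', 'g', ' ', 's', 'r', 'c', '=', '"', '.']
def pvIns : List Char := ['/', '_', 'i', 'm', 'a', 'g', 'e', 's']

-- reference left-to-right scan: what Python's replace does for this fixed nonempty pattern
def pvRep : List Char → List Char
  | [] => []
  | c :: t =>
    if pvPat.isPrefixOf (c :: t) then (pvPat ++ pvIns) ++ pvRep (List.drop 10 t)
    else c :: pvRep t
termination_by l => l.length
decreasing_by
  · simp
  · simp

theorem pv_go_rep : ∀ (fuel : Nat) (l acc : List Char), l.length ≤ fuel →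
    PySem.Chars.replace.go pvPat (pvPat ++ pvIns) fuel l acc = acc.reverse ++ pvRep l := by
  intro fuel
  induction fuel with
  | zero =>
    intro l acc h
    have : l = [] := List.eq_nil_of_length_eq_zero (Nat.le_zero.mp h)
    subst this
    simp [PySem.Chars.replace.go, pvRep]
  | succ fuel ih =>
    intro l acc h
    cases l with
    | nil => simp [PySem.Chars.replace.go, pvRep]
    | cons c t =>
      simp only [PySem.Chars.replace.go]
      by_cases hp : pvPat.isPrefixOf (c :: t)
      · rw [if_pos hp]
        have hlen : (List.drop pvPat.length (c :: t)).length ≤ fuel := by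
          have hpl : pvPat.length = 11 := rfl
          simp only [List.length_drop, List.length_cons, hpl] at *
          omega
        rw [ih _ _ hlen]
        have : List.drop pvPat.length (c :: t) = List.drop 10 t := by
          simp [pvPat]
        rw [this, pvRep, if_pos hp]
        simp
      · rw [if_neg hp]
        have hlen : t.length ≤ fuel := by
          simp only [List.length_cons] at h; omega
        rw [ih _ _ hlen, pvRep, if_neg hp]
        simp

theorem pv_replace_eq_rep (s : List Char) :
    PySem.Chars.replace s pvPat (pvPat ++ pvIns) = pvRep s := by
  rw [PySem.Chars.replace, if_neg (by simp [pvPat])]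
  simpa using pv_go_rep s.length s [] (le_refl _)

theorem pv_rep_no_infix (v : List Char) (h : ¬ pvPat <:+: v) : pvRep v = v := by
  induction v with
  | nil => simp [pvRep]
  | cons c t ih =>
    rw [pvRep, if_neg (by
      intro hp
      exact h (List.isPrefixOf_iff_prefix.mp hp).isInfix)]
    rw [ih (fun hi => h (List.infix_cons hi))]

theorem pv_rep_split : ∀ (a b : List Char),
    (∀ k < a.length, ¬ pvPat <+: List.drop k (a ++ pvPat ++ b)) →
    pvRep (a ++ pvPat ++ b) = a ++ (pvPat ++ pvIns) ++ pvRep b := by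
  intro a
  induction a with
  | nil =>
    intro b _
    simp only [List.nil_append]
    rw [show pvPat ++ b = '<' :: (['i', 'm', 'g', ' ', 's', 'r', 'c', '=', '"', '.'] ++ b) by simp [pvPat]]
    rw [pvRep, if_pos (by
      apply List.isPrefixOf_iff_prefix.mpr
      refine ⟨b, ?_⟩
      simp [pvPat])]
    simp [pvPat]
  | cons c a' ih =>
    intro b h
    have h0 : ¬ pvPat <+: (c :: (a' ++ pvPat ++ b)) := by
      have := h 0 (by simp)
      simpa using this
    rw [show (c :: a') ++ pvPat ++ b = c :: (a' ++ pvPat ++ b) by simp]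
    rw [pvRep, if_neg (fun hp => h0 (List.isPrefixOf_iff_prefix.mp hp))]
    rw [ih b (fun k hk => by
      have := h (k + 1) (by simp; omega)
      simpa using this)]
    simp

theorem pv_rep_ges (b : List Char) :
    pvRep ('g' :: 'e' :: 's' :: b) = 'g' :: 'e' :: 's' :: pvRep b := by
  rw [pvRep, if_neg (by simp [pvPat, List.isPrefixOf]),
      pvRep, if_neg (by simp [pvPat, List.isPrefixOf]),
      pvRep, if_neg (by simp [pvPat, List.isPrefixOf])]

theorem pv_go_main : ∀ (fuel : Nat) (u v : List Char), v.length < fuel →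
    setImgPathGo fuel (String.ofList (u ++ v)) (u.length : Int) = String.ofList (u ++ pvRep v) := by
  intro fuel
  induction fuel with
  | zero => intro u v h; omega
  | succ fuel ih =>
    intro u v hlen
    simp only [setImgPathGo, PySem.Str.findFrom_eq, String.toList_ofList,
      show ("<img src=\"." : String).toList = pvPat from rfl]
    rw [PySem.Chars.findFrom_natCast _ _ u.length (by simp), List.drop_left]
    by_cases h0 : PySem.Chars.find v pvPat = -1
    · rw [if_pos h0, if_pos rfl,
        pv_rep_no_infix v (PySem.Chars.find_eq_neg_one_iff v pvPat |>.mp h0)]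
    · have hf0 : 0 ≤ PySem.Chars.find v pvPat := by
        have := PySem.Chars.neg_one_le_find v pvPat; omega
      rw [if_neg h0]
      set f := PySem.Chars.find v pvPat with hfdef
      obtain ⟨hpre, hmin⟩ := PySem.Chars.find_spec (s := v) (sub := pvPat) hf0
      set fn := f.toNat with hfndef
      have hfc : (fn : Int) = f := Int.toNat_of_nonneg hf0
      obtain ⟨b, hb⟩ := hpre
      have hfnlen : fn ≤ v.length := by
        have := PySem.Chars.find_le_length v pvPat; omega
      have hv : v = v.take fn ++ pvPat ++ b := by
        rw [List.append_assoc, hb, List.take_append_drop]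
      set a := v.take fn with hadef
      have ha : a.length = fn := by
        simp [hadef]; omega
      rw [if_neg (by omega)]
      have hup : ((u.length : Int) + f + 11) = ((u.length + fn + 11 : Nat) : Int) := by
        push_cast; omega
      have hsplit : u ++ v = (u ++ a ++ pvPat) ++ b := by
        rw [hv]; simp
      have hpl : (u ++ a ++ pvPat).length = u.length + fn + 11 := by
        simp [ha, pvPat]; omega
      have harg :
          PySem.Str.slice (String.ofList (u ++ v)) none (some ((u.length : Int) + f + 11)) ++
            "/_images" ++
            PySem.Str.slice (String.ofList (u ++ v)) (some ((u.length : Int) + f + 11)) none =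
          String.ofList ((u ++ a ++ pvPat ++ ['/', '_', 'i', 'm', 'a']) ++ ('g' :: 'e' :: 's' :: b)) := by
        apply String.toList_inj.mp
        simp only [String.toList_append, PySem.Str.toList_slice, String.toList_ofList,
          PySem.Chars.slice_eq_listSlice, hup, PySem.List.slice_to_natCast,
          PySem.List.slice_from_natCast]
        rw [hsplit, List.take_left' hpl, List.drop_left' hpl]
        simp
      rw [harg]
      have hidx : ((u.length : Int) + f + 16) =
          (((u ++ a ++ pvPat ++ ['/', '_', 'i', 'm', 'a']).length : Nat) : Int) := by
        simp [ha, pvPat]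
        omega
      rw [hidx, ih _ _ (by
        have hvlen : v.length = fn + 11 + b.length := by
          rw [hv]; simp [ha, pvPat]; omega
        simp only [List.length_cons]
        omega)]
      congr 1
      rw [pv_rep_ges, hv, pv_rep_split a b (by
        intro k hk
        rw [← hv]
        exact hmin k (by omega))]
      simp [pvIns]

-- ===== VERDICT (by name: the statement is the Claim_ definition above) =====
theorem setImgPath_spec : Claim_equal_setImgPath := by
  intro rst _
  unfold Spec_setImgPath setImgPath setImgPath_alt
  have h := pv_go_main (rst.length + 1) [] rst.toList (by simp)
  simp only [List.nil_append, List.length_nil, Nat.cast_zero] at h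
  rw [show String.ofList rst.toList = rst by simp] at h
  rw [h]
  unfold PySem.Str.replace
  rw [show ("<img src=\"." : String).toList = pvPat from rfl,
      show ("<img src=\"./_images" : String).toList = pvPat ++ pvIns from rfl,
      pv_replace_eq_rep]
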